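-- pv_equiv track=rewrite | github.com/kirtisoglu/Allocation-of-Primary-Care-Centers-in-Chicago | gerrychain/tree.py | _power_set_sorted_by_size_then_sum
-- ===== SOURCE A (Python) =====
-- import itertools
--
-- def _power_set_sorted_by_size_then_sum(d):
--     power_set = [
--         s for i in range(1, len(d) + 1) for s in itertools.combinations(d.keys(), i)
--     ]
--
--     # Sort the subsets in descending order based on
--     # the sum of their corresponding values in the dictionary
--     sorted_power_set = sorted(
--         power_set, key=lambda s: (len(s), sum(d[i] for i in s)), reverse=True
--     )
--
--     return sorted_power_set
-- ===== SOURCE B (Python) =====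
-- def _power_set_sorted_by_size_then_sum(d):
--     # Recursive generation: combos(items, k) enumerates k-subsets in the same
--     # index-lexicographic order as itertools.combinations; build(i) walks sizes
--     # from len(d) down to 1 recursively, sorting each bucket by value-sum descending.
--     keys = list(d.keys())
--
--     def combos(items, k):
--         if k == 0:
--             return [()]
--         if not items:
--             return []
--         head, rest = items[0], items[1:]
--         return [(head,) + t for t in combos(rest, k - 1)] + combos(rest, k)
--
--     def build(i):
--         if i == 0:
--             return []
--         bucket = sorted(combos(keys, i), key=lambda s: sum(d[j] for j in s), reverse=True)
--         return bucket + build(i - 1)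
--
--     return build(len(keys))
-- ===== Notes on version B (the rewrite author's own statement) =====
-- stated objective: alternative
-- what changed: B drops itertools and the single global sort by the composite (len, sum) key: it generates each size's subsets with a hand-written recursion (same lexicographic order), sorts each bucket by value-sum descending alone, and concatenates buckets by a recursion from size len(d) down to 1.
import Mathlib
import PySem

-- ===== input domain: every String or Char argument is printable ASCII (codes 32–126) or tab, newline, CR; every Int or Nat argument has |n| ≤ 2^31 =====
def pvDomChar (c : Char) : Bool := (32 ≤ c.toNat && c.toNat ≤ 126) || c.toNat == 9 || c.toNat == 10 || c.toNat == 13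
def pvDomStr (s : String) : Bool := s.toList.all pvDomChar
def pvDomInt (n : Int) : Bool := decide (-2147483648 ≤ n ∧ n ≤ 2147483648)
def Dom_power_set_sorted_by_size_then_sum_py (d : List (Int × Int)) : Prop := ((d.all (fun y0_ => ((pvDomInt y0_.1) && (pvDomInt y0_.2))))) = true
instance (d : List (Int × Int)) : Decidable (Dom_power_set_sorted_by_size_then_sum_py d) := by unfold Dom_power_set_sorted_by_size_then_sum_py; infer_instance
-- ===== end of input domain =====

-- B replaces itertools + one global sort by the composite (len, sum) key with a hand-written
-- recursive subset generator per size and a recursive size descent concatenating per-size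
-- buckets, each sorted by value-sum descending.

-- ===== PORT A =====
def power_set_sorted_by_size_then_sum_py (d : List (Int × Int)) : List (List Int) :=
  let dd := PySem.Dict.ofList d
  let power_set := (PySem.List.pyRange 1 (PySem.Dict.size dd + 1) 1).foldl
      (fun acc i => acc ++ PySem.List.combinations (PySem.Dict.keys dd) i.toNat) []
  PySem.List.sorted2 power_set (fun s => (s.length : Int))
    (fun s => s.foldl (fun t j => t + PySem.Dict.getD dd j 0) 0) true

-- ===== PORT B =====
-- combos(items, k) of Source B: structural recursion on k and items
def pvCombos (items : List Int) (k : Nat) : List (List Int) :=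
  match k, items with
  | 0, _ => [[]]
  | _ + 1, [] => []
  | k + 1, head :: rest => (pvCombos rest k).map (fun t => head :: t) ++ pvCombos rest (k + 1)

-- build(i) of Source B: recursion on the size i, largest bucket first
def pvBuild (dd : PySem.Dict Int Int) (keys : List Int) : Nat → List (List Int)
  | 0 => []
  | i + 1 =>
      PySem.List.sorted (pvCombos keys (i + 1))
        (fun s => s.foldl (fun t j => t + PySem.Dict.getD dd j 0) 0) true
      ++ pvBuild dd keys i

def power_set_sorted_by_size_then_sum_py_alt (d : List (Int × Int)) : List (List Int) :=
  let dd := PySem.Dict.ofList d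
  let keys := PySem.Dict.keys dd
  pvBuild dd keys keys.length

-- ===== PRECONDITION & SPEC =====
def Spec_power_set_sorted_by_size_then_sum_py (d : List (Int × Int)) (out : List (List Int)) : Prop := out = power_set_sorted_by_size_then_sum_py_alt d
instance (d : List (Int × Int)) (out : List (List Int)) : Decidable (Spec_power_set_sorted_by_size_then_sum_py d out) := by unfold Spec_power_set_sorted_by_size_then_sum_py; infer_instance

-- ===== CLAIM (what is proved, stated in full; the proofs are below) =====
def Claim_equal_power_set_sorted_by_size_then_sum_py : Prop := ∀ (d : List (Int × Int)), Dom_power_set_sorted_by_size_then_sum_py d → Spec_power_set_sorted_by_size_then_sum_py d (power_set_sorted_by_size_then_sum_py d)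

-- ===== LEMMAS AND PROOFS =====

-- B's hand-written generator agrees with itertools.combinations
theorem pvCombos_eq_combinations :
    ∀ (k : Nat) (items : List Int), pvCombos items k = PySem.List.combinations items k := by
  intro k items
  induction items generalizing k with
  | nil =>
    cases k with
    | zero => simp [pvCombos, PySem.List.combinations_zero]
    | succ k => simp [pvCombos, PySem.List.combinations_nil_succ]
  | cons x xs ih =>
    cases k with
    | zero => simp [pvCombos, PySem.List.combinations_zero]
    | succ k => simp [pvCombos, PySem.List.combinations_cons_succ, ih k, ih (k + 1)]

-- the comparison sorted2 xs k1 k2 true inserts with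
def pvBefore {α : Type} (k1 k2 : α → Int) : α → α → Bool :=
  fun a b => decide (k1 b < k1 a) || (!decide (k1 a < k1 b) && decide (k2 b < k2 a))

theorem pv_sorted2_eq_foldl {α : Type} (xs : List α) (k1 k2 : α → Int) :
    PySem.List.sorted2 xs k1 k2 true
      = xs.foldl (fun acc x => PySem.List.insertBy (pvBefore k1 k2) x acc) [] := rfl

theorem pv_insertBy_split {α : Type} (before : α → α → Bool) (x : α) (front R : List α)
    (hR : ∀ y ∈ R, before x y = true) :
    PySem.List.insertBy before x (front ++ R) = PySem.List.insertBy before x front ++ R := by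
  induction front with
  | nil =>
    cases R with
    | nil => simp [PySem.List.insertBy]
    | cons r t => simp [PySem.List.insertBy, hR r (by simp)]
  | cons y f ih => by_cases h : before x y <;> simp [PySem.List.insertBy, h, ih]

theorem pv_insertBy_congr {α : Type} (b1 b2 : α → α → Bool) (x : α) (front : List α)
    (h : ∀ y ∈ front, b1 x y = b2 x y) :
    PySem.List.insertBy b1 x front = PySem.List.insertBy b2 x front := by
  induction front with
  | nil => rfl
  | cons y f ih =>
    simp only [PySem.List.insertBy, h y (by simp)]
    by_cases hb : b2 x y <;> simp [hb, ih (fun z hz => h z (by simp [hz]))]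

theorem pv_foldl_insertBy_big {α : Type} (b1 brev : α → α → Bool) (R : List α) :
    ∀ (G front : List α),
      (∀ x ∈ G, ∀ y ∈ R, b1 x y = true) →
      (∀ x ∈ G, ∀ y ∈ front, b1 x y = brev x y) →
      (∀ x ∈ G, ∀ y ∈ G, b1 x y = brev x y) →
      G.foldl (fun acc x => PySem.List.insertBy b1 x acc) (front ++ R)
        = G.foldl (fun acc x => PySem.List.insertBy brev x acc) front ++ R := by
  intro G
  induction G with
  | nil => intro front _ _ _; rfl
  | cons x G' ih =>
    intro front hR hfr hGG
    simp only [List.foldl_cons]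
    rw [pv_insertBy_split b1 x front R (hR x (by simp)),
        pv_insertBy_congr b1 brev x front (hfr x (by simp))]
    exact ih (PySem.List.insertBy brev x front)
      (fun a ha y hy => hR a (by simp [ha]) y hy)
      (fun a ha y hy => by
        rcases (PySem.List.mem_insertBy _ _ _ _).1 hy with rfl | hy'
        · exact hGG a (by simp [ha]) y (by simp)
        · exact hfr a (by simp [ha]) y hy')
      (fun a ha y hy => hGG a (by simp [ha]) y (by simp [hy]))

theorem pv_sorted2_graded {α : Type} (k1 k2 : α → Int) :
    ∀ (Gs : List (List α)),
      (∀ G ∈ Gs, ∀ x ∈ G, ∀ y ∈ G, k1 x = k1 y) →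
      Gs.Pairwise (fun G H => ∀ x ∈ G, ∀ y ∈ H, k1 x < k1 y) →
      PySem.List.sorted2 Gs.flatten k1 k2 true
        = ((Gs.map (fun G => PySem.List.sorted G k2 true)).reverse).flatten := by
  intro Gs
  induction Gs using List.reverseRecOn with
  | nil => intro _ _; rfl
  | append_singleton l G ih =>
    intro hconst hpw
    rw [List.pairwise_append] at hpw
    have hR : PySem.List.sorted2 l.flatten k1 k2 true
        = ((l.map (fun G => PySem.List.sorted G k2 true)).reverse).flatten :=
      ih (fun H hH => hconst H (by simp [hH])) hpw.1
    have hflat : (l ++ [G]).flatten = l.flatten ++ G := by simp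
    rw [hflat, pv_sorted2_eq_foldl, List.foldl_append, ← pv_sorted2_eq_foldl, hR]
    have hbig := pv_foldl_insertBy_big (pvBefore k1 k2)
        (fun a b => decide (k2 b < k2 a))
        ((l.map (fun G => PySem.List.sorted G k2 true)).reverse).flatten G []
        (by
          intro x hx y hy
          simp only [List.mem_flatten, List.mem_reverse, List.mem_map] at hy
          obtain ⟨S, ⟨H, hHl, rfl⟩, hyS⟩ := hy
          have hyH : y ∈ H := (PySem.List.mem_sorted _ _ _ _).1 hyS
          have : k1 y < k1 x := hpw.2.2 H hHl G (by simp) y hyH x hx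
          simp [pvBefore, this])
        (by intro x _ y hy; simp at hy)
        (by
          intro x hx y hy
          have h1 : k1 x = k1 y := hconst G (by simp) x hx y hy
          simp [pvBefore, h1])
    simp only [List.nil_append] at hbig
    rw [hbig, ← PySem.List.sorted_rev_eq_foldl_insertBy G k2]
    simp

-- B's size-descent recursion as a flatten of buckets, largest first
theorem pvBuild_eq_flatten (dd : PySem.Dict Int Int) (keys : List Int) :
    ∀ n : Nat, pvBuild dd keys n
      = ((List.range n).map (fun k =>
          PySem.List.sorted (PySem.List.combinations keys (n - k))
            (fun s => s.foldl (fun t j => t + PySem.Dict.getD dd j 0) 0) true)).flatten := by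
  intro n
  induction n with
  | zero => rfl
  | succ n ih =>
    conv_rhs => rw [List.range_succ_eq_map]
    simp only [List.map_cons, List.map_map, List.flatten_cons, Nat.sub_zero]
    simp only [pvBuild, pvCombos_eq_combinations, ih]
    congr 1
    congr 1
    apply List.map_congr_left
    intro k hk
    simp only [Function.comp_apply]
    have h : n + 1 - (k + 1) = n - k := by omega
    rw [h]

theorem pv_map_range_rev {β : Type} (f : Nat → β) :
    ∀ n : Nat, ((List.range n).map (fun k => f (k + 1))).reverse
      = (List.range n).map (fun k => f (n - k)) := by
  intro n
  induction n with
  | zero => rfl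
  | succ n ih =>
    conv_lhs => rw [List.range_succ]
    conv_rhs => rw [List.range_succ_eq_map]
    simp only [List.map_append, List.map_cons, List.map_nil, List.reverse_append,
      List.reverse_cons, List.reverse_nil, List.nil_append, List.singleton_append,
      List.map_map, Nat.sub_zero]
    rw [ih]
    simp [Function.comp_def]

-- ===== VERDICT (by name: the statement is the Claim_ definition above) =====
theorem power_set_sorted_by_size_then_sum_py_spec : Claim_equal_power_set_sorted_by_size_then_sum_py := by
  intro d _
  unfold Spec_power_set_sorted_by_size_then_sum_py
  unfold power_set_sorted_by_size_then_sum_py power_set_sorted_by_size_then_sum_py_alt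
  simp only []
  set dd := PySem.Dict.ofList d with hdd
  set keys := PySem.Dict.keys dd with hkeys
  set n := keys.length with hn
  have hsz : PySem.Dict.size dd = n := by
    simp [PySem.Dict.size, hn, hkeys, PySem.Dict.keys]
  set ksum := fun s : List Int => s.foldl (fun t j => t + PySem.Dict.getD dd j 0) 0 with hks
  set Gs := (List.range n).map (fun k => PySem.List.combinations keys (k + 1)) with hGs
  have hA : (PySem.List.pyRange 1 ((PySem.Dict.size dd : Int) + 1) 1).foldl
      (fun acc i => acc ++ PySem.List.combinations keys i.toNat) ([] : List (List Int))
      = Gs.flatten := by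
    rw [PySem.List.foldl_append_eq_flatMap, List.nil_append, hsz, PySem.List.pyRange_one]
    have h1 : ((n : Int) + 1 - 1).toNat = n := by omega
    rw [h1, List.flatMap_def, List.map_map, hGs]
    congr 1
    apply List.map_congr_left
    intro k hk
    have hk' := List.mem_range.1 hk
    simp only [Function.comp_apply]
    congr 1
    omega
  have hconst : ∀ G ∈ Gs, ∀ x ∈ G, ∀ y ∈ G, (x.length : Int) = (y.length : Int) := by
    intro G hG x hx y hy
    rw [hGs] at hG
    simp only [List.mem_map, List.mem_range] at hG
    obtain ⟨k, _, rfl⟩ := hG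
    have hx' := ((PySem.List.mem_combinations_iff keys (k + 1) x).1 hx).2
    have hy' := ((PySem.List.mem_combinations_iff keys (k + 1) y).1 hy).2
    rw [hx', hy']
  have hpw : Gs.Pairwise (fun G H => ∀ x ∈ G, ∀ y ∈ H, (x.length : Int) < (y.length : Int)) := by
    rw [hGs, List.pairwise_map]
    refine (List.pairwise_lt_range (n := n)).imp ?_
    intro a b hab x hx y hy
    have hx' := ((PySem.List.mem_combinations_iff keys (a + 1) x).1 hx).2
    have hy' := ((PySem.List.mem_combinations_iff keys (b + 1) y).1 hy).2
    rw [hx', hy']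
    exact_mod_cast Nat.succ_lt_succ hab
  rw [hA, pv_sorted2_graded (fun s => ((s : List Int).length : Int)) ksum Gs hconst hpw]
  rw [pvBuild_eq_flatten dd keys n, hGs, List.map_map]
  simp only [Function.comp_def]
  rw [pv_map_range_rev (fun m => PySem.List.sorted (PySem.List.combinations keys m) ksum true) n]
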